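-- pv_equiv track=rewrite | github.com/kgs/aoc2023 | day13/main.py | is_reflection
-- ===== SOURCE A (Python) =====
-- def is_reflection(p, v):
--     n = len(p)
--     i = 0
--     while 0 <= v - i and v + 1 + i < n:
--         if p[v - i] != p[v + 1 + i]:
--             return False
--         i += 1
--     return True
-- ===== SOURCE B (Python) =====
-- def is_reflection(p, v):
--     n = len(p)
--     k = min(v + 1, n - v - 1)
--     if k <= 0:
--         return True
--     return p[v - k + 1:v + 1][::-1] == p[v + 1:v + 1 + k]
-- ===== Notes on version B (the rewrite author's own statement) =====
-- stated objective: simpler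
-- what changed: Replaces the outward-expanding index loop with early returns by a closed-form overlap length k = min(v+1, n-v-1) followed by a single equality test between the reversed left window slice and the right window slice.
import Mathlib
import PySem

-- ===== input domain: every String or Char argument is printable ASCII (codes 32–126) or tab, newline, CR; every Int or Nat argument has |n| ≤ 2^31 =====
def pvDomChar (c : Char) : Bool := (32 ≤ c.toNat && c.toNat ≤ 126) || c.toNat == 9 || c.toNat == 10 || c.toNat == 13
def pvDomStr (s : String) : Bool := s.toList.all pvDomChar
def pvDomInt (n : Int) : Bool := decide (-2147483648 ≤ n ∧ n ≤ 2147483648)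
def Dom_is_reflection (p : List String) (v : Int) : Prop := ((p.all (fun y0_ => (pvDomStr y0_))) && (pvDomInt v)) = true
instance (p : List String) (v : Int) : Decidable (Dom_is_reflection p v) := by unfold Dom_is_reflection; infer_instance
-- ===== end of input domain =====

-- B replaces A's outward-expanding while loop by a closed-form overlap length and one
-- reversed-slice equality comparison (objective: simpler).

-- ===== PORT A =====
-- the while loop of A: i is the loop counter; fuel only bounds the recursion and is
-- chosen large enough (p.length + 1) that it never runs out before the loop condition fails
def is_reflection_loop (p : List String) (v : Int) : Nat → Int → Bool
  | 0, _ => true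
  | fuel + 1, i =>
    if 0 ≤ v - i ∧ v + 1 + i < (p.length : Int) then
      if PySem.List.pyGetD p (v - i) "" ≠ PySem.List.pyGetD p (v + 1 + i) "" then false
      else is_reflection_loop p v fuel (i + 1)
    else true

def is_reflection (p : List String) (v : Int) : Bool :=
  is_reflection_loop p v (p.length + 1) 0

-- ===== PORT B =====
def is_reflection_alt (p : List String) (v : Int) : Bool :=
  let n : Int := p.length
  let k := min (v + 1) (n - v - 1)
  if k ≤ 0 then true
  else (PySem.List.slice p (some (v - k + 1)) (some (v + 1))).reverse ==
       PySem.List.slice p (some (v + 1)) (some (v + 1 + k))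

-- ===== PRECONDITION & SPEC =====
def Spec_is_reflection (p : List String) (v : Int) (out : Bool) : Prop := out = is_reflection_alt p v
instance (p : List String) (v : Int) (out : Bool) : Decidable (Spec_is_reflection p v out) := by unfold Spec_is_reflection; infer_instance

-- ===== CLAIM (what is proved, stated in full; the proofs are below) =====
def Claim_equal_is_reflection : Prop := ∀ (p : List String) (v : Int), Dom_is_reflection p v → Spec_is_reflection p v (is_reflection p v)

-- ===== LEMMAS AND PROOFS =====

-- the loop returns true iff all remaining mirror pairs (indices t with j ≤ t < K) agree,
-- where K = min (v+1, n-v-1) is the number of pairs the loop visits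
theorem is_reflection_loop_char (p : List String) (v : Int) (fuel j : Nat)
    (hfuel : (min (v + 1) ((p.length : Int) - v - 1)).toNat + 1 ≤ fuel + j) :
    is_reflection_loop p v fuel (j : Int) =
      decide (∀ t : Nat, j ≤ t → t < (min (v + 1) ((p.length : Int) - v - 1)).toNat →
        p.getD (v - t).toNat "" = p.getD (v + 1 + t).toNat "") := by
  induction fuel generalizing j with
  | zero =>
    simp only [is_reflection_loop]
    symm
    apply decide_eq_true
    intro t h1 h2
    omega
  | succ fuel ih =>
    simp only [is_reflection_loop]
    by_cases hc : 0 ≤ v - (j : Int) ∧ v + 1 + (j : Int) < (p.length : Int)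
    · rw [if_pos hc]
      have hjK : j < (min (v + 1) ((p.length : Int) - v - 1)).toNat := by omega
      rw [PySem.List.pyGetD_of_nonneg p "" hc.1, PySem.List.pyGetD_of_nonneg p "" (by omega)]
      by_cases heq : p.getD (v - (j : Int)).toNat "" = p.getD (v + 1 + (j : Int)).toNat ""
      · rw [if_neg (by simpa using heq)]
        have : ((j : Int) + 1) = ((j + 1 : Nat) : Int) := by push_cast; ring
        rw [this, ih (j + 1) (by omega)]
        apply decide_eq_decide.mpr
        constructor
        · intro h t h1 h2
          rcases Nat.eq_or_lt_of_le h1 with h1 | h1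
          · subst h1; exact heq
          · exact h t h1 h2
        · intro h t h1 h2
          exact h t (by omega) h2
      · rw [if_pos (by simpa using heq)]
        symm
        apply decide_eq_false
        intro hP
        exact heq (hP j le_rfl hjK)
    · rw [if_neg hc]
      symm
      apply decide_eq_true
      intro t h1 h2
      -- the loop condition fails at j, so j ≥ K and the range j ≤ t < K is empty
      exfalso
      omega

-- boolean equality on lists is decidable equality
theorem list_beq_eq_decide (L1 L2 : List String) : (L1 == L2) = decide (L1 = L2) := by
  rw [Bool.eq_iff_iff]
  simp

-- reversed left window equals right window iff all mirror pairs agree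
theorem rev_window_eq (p : List String) (a b k : Nat) (hab : a + k = b) (hbk : b + k ≤ p.length) :
    ((List.take k (List.drop a p)).reverse = List.take k (List.drop b p)) ↔
      (∀ t : Nat, t < k → p.getD (a + k - 1 - t) "" = p.getD (b + t) "") := by
  have hlen1 : (List.take k (List.drop a p)).length = k := by
    simp [List.length_take, List.length_drop]; omega
  have hlen2 : (List.take k (List.drop b p)).length = k := by
    simp [List.length_take, List.length_drop]; omega
  constructor
  · intro h t ht
    have h1 := congrArg (fun l : List String => l.getD t "") h
    simp only at h1
    rw [List.getD_eq_getElem _ _ (by simp [hlen1]; omega),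
        List.getD_eq_getElem _ _ (by omega)] at h1
    rw [List.getElem_reverse] at h1
    simp only [List.getElem_take, List.getElem_drop, hlen1] at h1
    rw [show a + k - 1 - t = a + (k - 1 - t) from by omega]
    rw [List.getD_eq_getElem _ _ (by omega), List.getD_eq_getElem _ _ (by omega)]
    exact h1
  · intro h
    apply List.ext_getElem (by simp [hlen1, hlen2])
    intro i h1 h2
    have hi : i < k := by omega
    rw [List.getElem_reverse]
    simp only [List.getElem_take, List.getElem_drop, hlen1]
    have h3 := h i hi
    rw [show a + k - 1 - i = a + (k - 1 - i) from by omega] at h3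
    rw [List.getD_eq_getElem _ _ (by omega), List.getD_eq_getElem _ _ (by omega)] at h3
    exact h3

-- ===== VERDICT (by name: the statement is the Claim_ definition above) =====
theorem is_reflection_spec : Claim_equal_is_reflection := by
  intro p v _
  unfold Spec_is_reflection
  set n : Int := (p.length : Int) with hn
  set K : Int := min (v + 1) (n - v - 1) with hK
  have hA : is_reflection p v =
      decide (∀ t : Nat, 0 ≤ t → t < K.toNat →
        p.getD (v - t).toNat "" = p.getD (v + 1 + t).toNat "") := by
    have := is_reflection_loop_char p v (p.length + 1) 0 (by omega)
    simpa [is_reflection] using this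
  by_cases hk : K ≤ 0
  · have hB : is_reflection_alt p v = true := by
      simp only [is_reflection_alt]
      rw [if_pos hk]
    rw [hA, hB]
    apply decide_eq_true
    intro t _ h2
    omega
  · rw [not_le] at hk
    have hv : 0 ≤ v := by omega
    have hvn : v + 1 + K ≤ n := by omega
    have hB : is_reflection_alt p v =
        ((PySem.List.slice p (some (v - K + 1)) (some (v + 1))).reverse ==
          PySem.List.slice p (some (v + 1)) (some (v + 1 + K))) := by
      simp only [is_reflection_alt]
      rw [if_neg (by omega)]
    rw [hA, hB,
        PySem.List.slice_toNat p (by omega) (by omega),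
        PySem.List.slice_toNat p (by omega) (by omega),
        list_beq_eq_decide]
    have e1 : (v + 1).toNat - (v - K + 1).toNat = K.toNat := by omega
    have e2 : (v + 1 + K).toNat - (v + 1).toNat = K.toNat := by omega
    rw [e1, e2]
    apply decide_eq_decide.mpr
    rw [rev_window_eq p ((v - K + 1).toNat) ((v + 1).toNat) K.toNat (by omega) (by omega)]
    constructor
    · intro h t ht
      have := h t (by omega) ht
      have e3 : (v - K + 1).toNat + K.toNat - 1 - t = (v - (t : Int)).toNat := by omega
      have e4 : (v + 1).toNat + t = (v + 1 + (t : Int)).toNat := by omega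
      rw [e3, e4]
      exact this
    · intro h t _ ht
      have := h t ht
      have e3 : (v - K + 1).toNat + K.toNat - 1 - t = (v - (t : Int)).toNat := by omega
      have e4 : (v + 1).toNat + t = (v + 1 + (t : Int)).toNat := by omega
      rw [e3, e4] at this
      exact this
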